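-- pv_equiv track=rewrite | github.com/neeraj-1729/Tau-Trigger-SF | python/utils.py | getwpinfo
-- ===== SOURCE A (Python) =====
-- def getwpinfo(id,wps):
--   """Help function to create description of WP inputs."""
--   try:
--     wpmin = max([w for w in wps if 'loose' in w.lower()],key=lambda x: len(x)) # get loose WP with most 'V's
--     wpmax = max([w for w in wps if 'tight' in w.lower()],key=lambda x: len(x)) # get tight WP with most 'V's
--     info  = f"{id} working point: {wpmin}-{wpmax}"
--   except:
--     info  = f"{id} working point: {', '.join(wps)}"
--   return info
-- ===== SOURCE B (Python) =====
-- def getwpinfo(id, wps):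
--   """Help function to create description of WP inputs."""
--   # Rank all WPs longest-first once (stable sort keeps original order on ties),
--   # then the first match of each substring is the longest such WP.
--   ranked = sorted(wps, key=len, reverse=True)
--   wpmin = next((w for w in ranked if 'loose' in w.lower()), None)
--   wpmax = next((w for w in ranked if 'tight' in w.lower()), None)
--   if wpmin is None or wpmax is None:
--     return f"{id} working point: {', '.join(wps)}"
--   return f"{id} working point: {wpmin}-{wpmax}"
-- ===== Notes on version B (the rewrite author's own statement) =====
-- stated objective: alternative
-- what changed: Instead of max() over two filtered comprehensions inside try/except, B stably sorts wps once by length in descending order and takes the first 'loose' and first 'tight' entry of the ranked list (first match in a stable longest-first ranking equals max(key=len)), branching on None instead of catching ValueError.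
import Mathlib
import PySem

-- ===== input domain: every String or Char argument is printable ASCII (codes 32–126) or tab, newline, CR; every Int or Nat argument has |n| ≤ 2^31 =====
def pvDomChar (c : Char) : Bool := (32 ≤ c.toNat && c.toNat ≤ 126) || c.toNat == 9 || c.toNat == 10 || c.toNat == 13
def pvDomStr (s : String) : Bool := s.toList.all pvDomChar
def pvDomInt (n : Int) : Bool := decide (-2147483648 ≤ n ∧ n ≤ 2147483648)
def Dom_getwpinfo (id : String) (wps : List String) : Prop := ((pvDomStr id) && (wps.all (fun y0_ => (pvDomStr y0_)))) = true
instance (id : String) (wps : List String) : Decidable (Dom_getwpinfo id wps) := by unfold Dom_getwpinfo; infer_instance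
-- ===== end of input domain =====

-- B ranks wps once by descending length (stable sort) and takes the first 'loose'/'tight' entry, replacing A's two filtered max() scans under try/except (alternative decomposition, same cost class).


-- ===== PORT A =====
-- try: wpmin = max([w for w in wps if 'loose' in w.lower()], key=len); same for 'tight'.
-- An empty filtered list raises ValueError, caught by the bare except which joins wps.
def getwpinfo (id : String) (wps : List String) : String :=
  match PySem.List.max? (wps.filter (fun w => PySem.Str.isIn "loose" (PySem.Str.lower w))) PySem.Str.len with
  | none => id ++ " working point: " ++ PySem.Str.join ", " wps
  | some wpmin =>
    match PySem.List.max? (wps.filter (fun w => PySem.Str.isIn "tight" (PySem.Str.lower w))) PySem.Str.len with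
    | none => id ++ " working point: " ++ PySem.Str.join ", " wps
    | some wpmax => id ++ " working point: " ++ wpmin ++ "-" ++ wpmax

-- ===== PORT B =====
-- ranked = sorted(wps, key=len, reverse=True); wpmin/wpmax = first 'loose'/'tight' match in ranked
def getwpinfo_alt (id : String) (wps : List String) : String :=
  let ranked := PySem.List.sorted wps PySem.Str.len true
  let wpmin := ranked.find? (fun w => PySem.Str.isIn "loose" (PySem.Str.lower w))
  let wpmax := ranked.find? (fun w => PySem.Str.isIn "tight" (PySem.Str.lower w))
  match wpmin, wpmax with
  | some mn, some mx => id ++ " working point: " ++ mn ++ "-" ++ mx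
  | _, _ => id ++ " working point: " ++ PySem.Str.join ", " wps

-- ===== PRECONDITION & SPEC =====
def Spec_getwpinfo (id : String) (wps : List String) (out : String) : Prop := out = getwpinfo_alt id wps
instance (id : String) (wps : List String) (out : String) : Decidable (Spec_getwpinfo id wps out) := by unfold Spec_getwpinfo; infer_instance

-- ===== CLAIM (what is proved, stated in full; the proofs are below) =====
def Claim_equal_getwpinfo : Prop := ∀ (id : String) (wps : List String), Dom_getwpinfo id wps → Spec_getwpinfo id wps (getwpinfo id wps)

-- ===== LEMMAS AND PROOFS =====

-- insertion into a length-descending list preserves the descending order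
theorem pv_insertBy_pairwise (x : String) (acc : List String)
    (h : acc.Pairwise (fun a b => PySem.Str.len b ≤ PySem.Str.len a)) :
    (PySem.List.insertBy (fun a b => decide (PySem.Str.len b < PySem.Str.len a)) x acc).Pairwise
      (fun a b => PySem.Str.len b ≤ PySem.Str.len a) := by
  induction acc with
  | nil => simp [PySem.List.insertBy]
  | cons y ys ih =>
    rw [List.pairwise_cons] at h
    by_cases hlt : PySem.Str.len y < PySem.Str.len x
    · simp only [PySem.List.insertBy, hlt, decide_true, if_true]
      refine List.pairwise_cons.mpr ⟨?_, List.pairwise_cons.mpr ⟨h.1, h.2⟩⟩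
      intro z hz
      rcases List.mem_cons.mp hz with rfl | hz
      · exact le_of_lt hlt
      · exact le_trans (h.1 z hz) (le_of_lt hlt)
    · simp only [PySem.List.insertBy, hlt, decide_false, Bool.false_eq_true, if_false]
      refine List.pairwise_cons.mpr ⟨?_, ih h.2⟩
      intro z hz
      rcases (PySem.List.mem_insertBy _ _ _ _).mp hz with rfl | hz
      · exact not_lt.mp hlt
      · exact h.1 z hz

-- first match in the list after insertion = the running-max step on the first match before it
theorem pv_find_insertBy (p : String → Bool) (x : String) (acc : List String)
    (h : acc.Pairwise (fun a b => PySem.Str.len b ≤ PySem.Str.len a)) :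
    (PySem.List.insertBy (fun a b => decide (PySem.Str.len b < PySem.Str.len a)) x acc).find? p =
      if p x then
        (match acc.find? p with
         | none => some x
         | some m => if PySem.Str.len m < PySem.Str.len x then some x else some m)
      else acc.find? p := by
  induction acc with
  | nil => by_cases hpx : p x <;> simp [PySem.List.insertBy, List.find?, hpx]
  | cons y ys ih =>
    rw [List.pairwise_cons] at h
    by_cases hlt : PySem.Str.len y < PySem.Str.len x
    · rw [show PySem.List.insertBy (fun a b => decide (PySem.Str.len b < PySem.Str.len a)) x (y :: ys)
            = x :: y :: ys from by
          simp only [PySem.List.insertBy]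
          rw [if_pos (decide_eq_true hlt)]]
      by_cases hpx : p x
      · rw [List.find?_cons_of_pos hpx, if_pos hpx]
        cases hf : (y :: ys).find? p with
        | none => rfl
        | some m =>
          have hm : m ∈ y :: ys := List.mem_of_find?_eq_some hf
          have hmy : PySem.Str.len m ≤ PySem.Str.len y := by
            rcases List.mem_cons.mp hm with rfl | hm
            · exact le_refl _
            · exact h.1 m hm
          have hx : PySem.Str.len m < PySem.Str.len x := lt_of_le_of_lt hmy hlt
          show some x = if PySem.Str.len m < PySem.Str.len x then some x else some m
          rw [if_pos hx]
      · rw [List.find?_cons_of_neg hpx, if_neg hpx]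
    · rw [show PySem.List.insertBy (fun a b => decide (PySem.Str.len b < PySem.Str.len a)) x (y :: ys)
            = y :: PySem.List.insertBy (fun a b => decide (PySem.Str.len b < PySem.Str.len a)) x ys
          from by
          simp only [PySem.List.insertBy]
          rw [if_neg (by simpa using hlt)]]
      by_cases hpy : p y
      · rw [List.find?_cons_of_pos hpy, List.find?_cons_of_pos hpy]
        by_cases hpx : p x
        · rw [if_pos hpx]
          show some y = if PySem.Str.len y < PySem.Str.len x then some x else some y
          rw [if_neg hlt]
        · rw [if_neg hpx]
      · rw [List.find?_cons_of_neg hpy, List.find?_cons_of_neg hpy]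
        exact ih h.2

-- the loop invariant: scanning the partially built ranked list = running max over the filtered prefix
theorem pv_loop (p : String → Bool) (xs acc : List String)
    (h : acc.Pairwise (fun a b => PySem.Str.len b ≤ PySem.Str.len a)) :
    (xs.foldl (fun acc x => PySem.List.insertBy (fun a b => decide (PySem.Str.len b < PySem.Str.len a)) x acc) acc).find? p =
      xs.foldl (fun o x => if p x then
          (match o with
           | none => some x
           | some m => if PySem.Str.len m < PySem.Str.len x then some x else some m)
        else o) (acc.find? p) := by
  induction xs generalizing acc with
  | nil => rfl
  | cons x t ih =>
    simp only [List.foldl_cons]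
    rw [ih _ (pv_insertBy_pairwise x acc h), pv_find_insertBy p x acc h]

-- first match in the stable longest-first ranking = max(key=len) of the filtered list
theorem pv_find_sorted_eq_max (p : String → Bool) (wps : List String) :
    (PySem.List.sorted wps PySem.Str.len true).find? p =
      PySem.List.max? (wps.filter p) PySem.Str.len := by
  rw [PySem.List.sorted_rev_eq_foldl_insertBy, pv_loop p wps [] List.Pairwise.nil]
  simp only [PySem.List.max?, List.foldl_filter, List.find?]
  congr 1
  funext o x
  cases o <;> rfl

-- ===== VERDICT (by name: the statement is the Claim_ definition above) =====
theorem getwpinfo_spec : Claim_equal_getwpinfo := by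
  intro id wps _
  unfold Spec_getwpinfo getwpinfo getwpinfo_alt
  simp only [pv_find_sorted_eq_max]
  cases PySem.List.max? (wps.filter (fun w => PySem.Str.isIn "loose" (PySem.Str.lower w))) PySem.Str.len with
  | none =>
    cases PySem.List.max? (wps.filter (fun w => PySem.Str.isIn "tight" (PySem.Str.lower w))) PySem.Str.len <;> rfl
  | some wpmin =>
    cases PySem.List.max? (wps.filter (fun w => PySem.Str.isIn "tight" (PySem.Str.lower w))) PySem.Str.len <;> rfl
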